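-- pv_equiv track=rewrite | github.com/yutao-li/leetcode | google/3130.py | GetFirstDiceRollOfBestSequence1
-- ===== SOURCE A (Python) =====
-- from collections import deque
--
-- def GetFirstDiceRollOfBestSequence1(cells: [int]):
--     n = len(cells)
--     if n < 6:
--         return 0
--     window_min = deque()
--     for i in range(n - 1, n - 7, -1):
--         while window_min and cells[window_min[-1]] > cells[i]:
--             window_min.pop()
--         window_min.append(i)
--     for i in range(n - 7, -1, -1):
--         cells[i] += cells[window_min[0]]
--         if window_min[0] == i + 6:
--             window_min.popleft()
--         while window_min and cells[window_min[-1]] > cells[i]: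
--             window_min.pop()
--         window_min.append(i)
--     return window_min[0] + 1
-- ===== SOURCE B (Python) =====
-- def GetFirstDiceRollOfBestSequence1(cells):
--     n = len(cells)
--     if n < 6:
--         return 0
--     for i in range(n - 7, -1, -1):
--         cells[i] += min(cells[i + 1:i + 7])
--     best = 0
--     for j in range(6):
--         if cells[j] <= cells[best]:
--             best = j
--     return best + 1
-- ===== Notes on version B (the rewrite author's own statement) =====
-- stated objective: simpler
-- what changed: Replaces the hand-maintained monotone deque (push/pop/popleft index bookkeeping) with a direct min over each constant-size 6-element window slice and a final 6-element argmin scan (<= so ties pick the larger index, matching the deque front).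
import Mathlib
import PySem

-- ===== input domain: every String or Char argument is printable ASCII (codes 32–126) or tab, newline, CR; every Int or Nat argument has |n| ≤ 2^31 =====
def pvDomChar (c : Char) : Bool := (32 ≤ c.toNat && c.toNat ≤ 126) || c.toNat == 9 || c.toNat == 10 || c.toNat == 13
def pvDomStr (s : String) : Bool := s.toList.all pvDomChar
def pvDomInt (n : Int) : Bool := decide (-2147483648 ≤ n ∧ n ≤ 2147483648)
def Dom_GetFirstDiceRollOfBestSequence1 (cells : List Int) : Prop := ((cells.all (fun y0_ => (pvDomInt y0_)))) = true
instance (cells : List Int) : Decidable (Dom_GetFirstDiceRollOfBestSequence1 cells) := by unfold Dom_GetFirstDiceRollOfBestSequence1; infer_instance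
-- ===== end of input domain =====

-- B replaces A's explicit monotone deque with a direct min over each constant-size 6-window
-- plus a final 6-element argmin scan (objective: simpler).  Both A and B mutate `cells`
-- identically in Python; the theorem below is about the return value.

-- cells[j] as both Pythons read it (every access is in range when it happens)
def pvGet (cells : List Int) (j : Int) : Int := (PySem.List.pyGet? cells j).getD 0

-- ===== PORT A =====
-- the deque is stored BACK-FIRST: Python append = cons, pop = tail via dropWhile,
-- window_min[-1] = head, window_min[0] = getLast, popleft = dropLast
def pvPopWhile (cells : List Int) (v : Int) : List Int → List Int
  | [] => []
  | j :: rest => if pvGet cells j > v then pvPopWhile cells v rest else j :: rest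

def pvFront (wm : List Int) : Int := wm.getLast?.getD 0

def pvPush (cells : List Int) (wm : List Int) (i : Int) : List Int :=
  i :: pvPopWhile cells (pvGet cells i) wm

def pvStepA (st : List Int × List Int) (i : Int) : List Int × List Int :=
  let c := st.1
  let wm := st.2
  let c1 := PySem.List.pySetD c i (pvGet c i + pvGet c (pvFront wm))
  let wm1 := if pvFront wm = i + 6 then wm.dropLast else wm
  (c1, pvPush c1 wm1 i)

def GetFirstDiceRollOfBestSequence1 (cells : List Int) : Int :=
  let n : Int := cells.length
  if n < 6 then 0
  else
    let wm := (PySem.List.pyRange (n - 1) (n - 7) (-1)).foldl (pvPush cells) []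
    let st := (PySem.List.pyRange (n - 7) (-1) (-1)).foldl pvStepA (cells, wm)
    pvFront st.2 + 1

-- ===== PORT B =====
def pvStepB (c : List Int) (i : Int) : List Int :=
  PySem.List.pySetD c i (pvGet c i +
    (PySem.List.min? (PySem.List.slice c (some (i + 1)) (some (i + 7))) (fun x => x)).getD 0)

def GetFirstDiceRollOfBestSequence1_alt (cells : List Int) : Int :=
  let n : Int := cells.length
  if n < 6 then 0
  else
    let c2 := (PySem.List.pyRange (n - 7) (-1) (-1)).foldl pvStepB cells
    let best := (PySem.List.pyRange 0 6 1).foldl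
      (fun best j => if pvGet c2 j ≤ pvGet c2 best then j else best) 0
    best + 1

-- ===== PRECONDITION & SPEC =====
def Spec_GetFirstDiceRollOfBestSequence1 (cells : List Int) (out : Int) : Prop := out = GetFirstDiceRollOfBestSequence1_alt cells
instance (cells : List Int) (out : Int) : Decidable (Spec_GetFirstDiceRollOfBestSequence1 cells out) := by unfold Spec_GetFirstDiceRollOfBestSequence1; infer_instance

-- ===== CLAIM (what is proved, stated in full; the proofs are below) =====
def Claim_equal_GetFirstDiceRollOfBestSequence1 : Prop := ∀ (cells : List Int), Dom_GetFirstDiceRollOfBestSequence1 cells → Spec_GetFirstDiceRollOfBestSequence1 cells (GetFirstDiceRollOfBestSequence1 cells)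

-- ===== LEMMAS AND PROOFS =====

-- window of indices [lo, lo+len)
def pvWin (lo : Int) (len : Nat) : List Int := (List.range len).map (fun (d : Nat) => lo + (d : Int))

-- canonical deque contents for a window, built by A's own push recursion
def pvMkdeq (cells : List Int) : List Int → List Int
  | [] => []
  | j :: rest => j :: (pvMkdeq cells rest).dropWhile (fun k => decide (pvGet cells j < pvGet cells k))

-- B's final argmin scan (ties -> later index)
def pvScan (cells : List Int) (b0 : Int) (L : List Int) : Int :=
  L.foldl (fun best j => if pvGet cells j ≤ pvGet cells best then j else best) b0

lemma pvWin_cons (lo : Int) (len : Nat) : pvWin lo (len + 1) = lo :: pvWin (lo + 1) len := by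
  simp only [pvWin, List.range_succ_eq_map, List.map_cons, List.map_map]
  congr 1
  · simp
  · refine List.map_congr_left fun d _ => ?_
    simp only [Function.comp_apply]
    push_cast
    ring

lemma pvWin_snoc (lo : Int) (len : Nat) : pvWin lo (len + 1) = pvWin lo len ++ [lo + len] := by
  simp [pvWin, List.range_succ]

lemma pvWin_mem {lo j : Int} {len : Nat} (h : j ∈ pvWin lo len) : lo ≤ j ∧ j < lo + len := by
  simp only [pvWin, List.mem_map] at h
  obtain ⟨d, hd, rfl⟩ := h
  have := List.mem_range.mp hd
  omega

lemma pvSetD_eq (c : List Int) (i v : Int) (h : 0 ≤ i) :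
    PySem.List.pySetD c i v = c.set i.toNat v := by
  first
  | exact PySem.List.pySetD_of_nonneg _ _ _ h
  | exact PySem.List.pySetD_of_nonneg h
  | exact PySem.List.pySetD_of_nonneg _ h
  | exact PySem.List.pySetD_of_nonneg _ _ h
  | exact PySem.List.pySetD_of_nonneg _ _ _ _ h

lemma pvGet_nonneg (c : List Int) (j : Int) (h : 0 ≤ j) :
    pvGet c j = (getElem? c j.toNat).getD 0 := by
  unfold pvGet
  rw [PySem.List.pyGet?_of_nonneg c h]

lemma pvDropWhile_congr {α : Type} (p q : α → Bool) (l : List α)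
    (h : ∀ x ∈ l, p x = q x) : l.dropWhile p = l.dropWhile q := by
  induction l with
  | nil => rfl
  | cons x xs ih =>
    rw [List.dropWhile_cons, List.dropWhile_cons, h x (List.mem_cons_self ..),
      ih (fun y hy => h y (List.mem_cons_of_mem _ hy))]

lemma pvPopWhile_eq_dropWhile (c : List Int) (v : Int) (l : List Int) :
    pvPopWhile c v l = l.dropWhile (fun k => decide (v < pvGet c k)) := by
  induction l with
  | nil => simp [pvPopWhile]
  | cons j rest ih =>
    by_cases h : v < pvGet c j <;>
      simp [pvPopWhile, List.dropWhile_cons, h, ih]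

lemma pvPush_mkdeq (c : List Int) (L : List Int) (j : Int) :
    pvPush c (pvMkdeq c L) j = pvMkdeq c (j :: L) := by
  simp [pvPush, pvMkdeq, pvPopWhile_eq_dropWhile]

lemma pvMkdeq_sublist (c : List Int) (L : List Int) : (pvMkdeq c L).Sublist L := by
  induction L with
  | nil => simp [pvMkdeq]
  | cons j rest ih =>
    exact (List.Sublist.cons₂ j ((List.dropWhile_sublist _).trans ih))

lemma pvMkdeq_congr (c1 c2 : List Int) (L : List Int)
    (h : ∀ j ∈ L, pvGet c1 j = pvGet c2 j) : pvMkdeq c1 L = pvMkdeq c2 L := by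
  induction L with
  | nil => rfl
  | cons j rest ih =>
    have hrest := ih (fun x hx => h x (List.mem_cons_of_mem _ hx))
    have hj := h j (List.mem_cons_self ..)
    simp only [pvMkdeq]
    simp only [hrest, hj]
    congr 1
    refine pvDropWhile_congr _ _ _ fun k hk => ?_
    rw [h k (List.mem_cons_of_mem _ ((pvMkdeq_sublist c2 rest).mem hk))]

lemma pvMkdeq_append_le (c : List Int) (L : List Int) (t : Int)
    (h : ∀ j ∈ L, pvGet c t ≤ pvGet c j) : pvMkdeq c (L ++ [t]) = pvMkdeq c L ++ [t] := by
  induction L with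
  | nil => simp [pvMkdeq]
  | cons j L ih =>
    have ht : pvGet c t ≤ pvGet c j := h j (List.mem_cons_self ..)
    have ih' := ih (fun x hx => h x (List.mem_cons_of_mem _ hx))
    simp only [List.cons_append, pvMkdeq, ih', List.dropWhile_append]
    by_cases he : (pvMkdeq c L).dropWhile (fun k => decide (pvGet c j < pvGet c k)) = []
    · simp [he, List.dropWhile_cons, show ¬ (pvGet c j < pvGet c t) by omega]
    · simp [he]

lemma pvMkdeq_append_lt (c : List Int) (L : List Int) (t : Int)
    (h : ∃ j ∈ L, pvGet c j < pvGet c t) : pvMkdeq c (L ++ [t]) = pvMkdeq c L := by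
  induction L with
  | nil => simp at h
  | cons j L ih =>
    simp only [List.cons_append, pvMkdeq]
    by_cases hex : ∃ x ∈ L, pvGet c x < pvGet c t
    · rw [ih hex]
    · push_neg at hex
      have hj : pvGet c j < pvGet c t := by
        rcases h with ⟨x, hx, hlt⟩
        rcases List.mem_cons.mp hx with rfl | hx'
        · exact hlt
        · exact absurd hlt (by have := hex x hx'; omega)
      rw [pvMkdeq_append_le c L t hex, List.dropWhile_append]
      by_cases he : (pvMkdeq c L).dropWhile (fun k => decide (pvGet c j < pvGet c k)) = []
      · simp [he, List.dropWhile_cons, hj]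
      · exfalso
        have hhead :
            (fun k => decide (pvGet c j < pvGet c k))
              (((pvMkdeq c L).dropWhile (fun k => decide (pvGet c j < pvGet c k))).head he)
              = false := by
          first
          | exact List.head_dropWhile_not _ _ he
          | exact List.head_dropWhile_not _ he
          | exact List.head_dropWhile_not he
        have hkmem : ((pvMkdeq c L).dropWhile
              (fun k => decide (pvGet c j < pvGet c k))).head he ∈ pvMkdeq c L :=
          (List.dropWhile_sublist _).mem (List.head_mem he)
        have hkL := (pvMkdeq_sublist c L).mem hkmem
        have := hex _ hkL
        simp only [decide_eq_false_iff_not, not_lt] at hhead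
        omega

lemma pvMkdeq_getLast (c : List Int) (L : List Int) (b0 : Int) :
    (pvMkdeq c (b0 :: L)).getLast? = some (pvScan c b0 L)
    ∧ pvScan c b0 L ∈ b0 :: L
    ∧ ∀ j ∈ b0 :: L, pvGet c (pvScan c b0 L) ≤ pvGet c j := by
  induction L using List.reverseRecOn with
  | nil =>
    refine ⟨?_, ?_, ?_⟩ <;> simp [pvMkdeq, pvScan]
  | append_singleton L t ih =>
    obtain ⟨h1, h2, h3⟩ := ih
    have hscan : pvScan c b0 (L ++ [t])
        = if pvGet c t ≤ pvGet c (pvScan c b0 L) then t else pvScan c b0 L := by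
      simp [pvScan, List.foldl_append]
    have hcat : b0 :: (L ++ [t]) = (b0 :: L) ++ [t] := rfl
    by_cases hle : pvGet c t ≤ pvGet c (pvScan c b0 L)
    · have hall : ∀ j ∈ b0 :: L, pvGet c t ≤ pvGet c j := fun j hj => le_trans hle (h3 j hj)
      have hmk := pvMkdeq_append_le c (b0 :: L) t hall
      refine ⟨?_, ?_, ?_⟩
      · rw [hcat, hmk, hscan, if_pos hle, List.getLast?_concat]
      · rw [hscan, if_pos hle]
        simp
      · intro j hj
        rw [hscan, if_pos hle]
        rw [hcat, List.mem_append] at hj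
        rcases hj with hj | hj
        · exact hall _ hj
        · simp only [List.mem_singleton] at hj
          subst hj
          exact le_refl _
    · push_neg at hle
      have hmk := pvMkdeq_append_lt c (b0 :: L) t ⟨pvScan c b0 L, h2, hle⟩
      refine ⟨?_, ?_, ?_⟩
      · rw [hcat, hmk, hscan, if_neg (by omega), h1]
      · rw [hscan, if_neg (by omega), hcat]
        exact List.mem_append_left _ h2
      · intro j hj
        rw [hscan, if_neg (by omega)]
        rw [hcat, List.mem_append] at hj
        rcases hj with hj | hj
        · exact h3 _ hj
        · simp only [List.mem_singleton] at hj
          subst hj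
          omega

lemma pvSlice_eq_map_win (c : List Int) (a : Int) (len : Nat) (ha : 0 ≤ a)
    (hlen : a + len ≤ c.length) :
    PySem.List.slice c (some a) (some (a + len)) = (pvWin a len).map (pvGet c) := by
  have hb : (0:Int) ≤ a + (len:Int) := by omega
  have hA : (a + (len:Int)).toNat = a.toNat + len := by omega
  rw [PySem.List.slice_toNat c ha hb]
  refine List.ext_getElem ?_ ?_
  · simp [pvWin, hA]
    omega
  · intro k h1 h2
    have hk : k < len := by simpa [pvWin] using h2
    have h0k : (0:Int) ≤ a + (k:Int) := by omega
    have hA2 : (a + (k:Int)).toNat = a.toNat + k := by omega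
    simp [pvWin, pvGet_nonneg _ _ h0k, hA2,
      List.getElem?_eq_getElem (show a.toNat + k < c.length from by omega),
      List.getElem_take, List.getElem_drop]

lemma pvMin_slice (c : List Int) (i : Int) (h0 : 0 ≤ i) (h7 : i + 7 ≤ c.length) :
    (PySem.List.min? (PySem.List.slice c (some (i + 1)) (some (i + 7))) (fun x => x)).getD 0
      = pvGet c (pvScan c (i + 1) (pvWin (i + 2) 5)) := by
  have h6 : (i + 7) = (i + 1) + ((6:Nat):Int) := by push_cast; ring
  rw [h6, pvSlice_eq_map_win c (i+1) 6 (by omega) (by push_cast at h7 ⊢; omega)]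
  obtain ⟨h1, h2, h3⟩ := pvMkdeq_getLast c (pvWin (i+2) 5) (i+1)
  have hw : pvWin (i+1) 6 = (i+1) :: pvWin (i+2) 5 := by
    have := pvWin_cons (i+1) 5
    simpa [(show i+1+1 = i+2 from by ring)] using this
  cases hmin : PySem.List.min? ((pvWin (i+1) 6).map (pvGet c)) (fun x => x) with
  | none =>
    rw [PySem.List.min?_eq_none_iff] at hmin
    rw [hw] at hmin
    simp at hmin
  | some m =>
    have hmem := PySem.List.min?_mem hmin
    have hisMin := PySem.List.min?_isMin hmin
    have hsmem : pvGet c (pvScan c (i+1) (pvWin (i+2) 5)) ∈ (pvWin (i+1) 6).map (pvGet c) := by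
      refine List.mem_map_of_mem ?_
      rw [hw]
      exact h2
    have h4 : m ≤ pvGet c (pvScan c (i+1) (pvWin (i+2) 5)) := hisMin _ hsmem
    have h5 : pvGet c (pvScan c (i+1) (pvWin (i+2) 5)) ≤ m := by
      rcases List.mem_map.mp hmem with ⟨j, hj, rfl⟩
      refine h3 j ?_
      rw [← hw]
      exact hj
    simp only [Option.getD_some]
    omega

lemma pvGet_set (c : List Int) (i j v : Int) (h0 : 0 ≤ i) (hj : 0 ≤ j) :
    pvGet (PySem.List.pySetD c i v) j = if j = i ∧ i < c.length then v else pvGet c j := by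
  rw [pvGet_nonneg _ _ hj, pvGet_nonneg _ _ hj, pvSetD_eq c i v h0]
  rcases eq_or_ne j i with rfl | hne
  · by_cases hlt : j < (c.length : Int)
    · rw [if_pos ⟨rfl, hlt⟩, List.getElem?_set, if_pos rfl, if_pos (by omega)]
      simp
    · rw [if_neg (fun hc => absurd hc.2 hlt),
        List.getElem?_set, if_pos rfl, if_neg (by omega),
        List.getElem?_eq_none (by omega)]
  · rw [if_neg (fun hc => hne hc.1)]
    have htn : ¬ (i.toNat = j.toNat) := by omega
    rw [List.getElem?_set, if_neg htn]

lemma pvStepA_spec (c wm : List Int) (i : Int) (h0 : 0 ≤ i) (h7 : i + 7 ≤ (c.length : Int))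
    (hwm : wm = pvMkdeq c (pvWin (i + 1) 6)) :
    (pvStepA (c, wm) i).1 = pvStepB c i
    ∧ (pvStepA (c, wm) i).2 = pvMkdeq (pvStepA (c, wm) i).1 (pvWin i 6)
    ∧ ((pvStepA (c, wm) i).1).length = c.length := by
  obtain ⟨h1, h2, h3⟩ := pvMkdeq_getLast c (pvWin (i+2) 5) (i+1)
  have hw6 : pvWin (i+1) 6 = (i+1) :: pvWin (i+2) 5 := by
    have := pvWin_cons (i+1) 5
    simpa [(show i+1+1 = i+2 from by ring)] using this
  have hfront : pvFront wm = pvScan c (i+1) (pvWin (i+2) 5) := by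
    rw [hwm, hw6, pvFront, h1]
    rfl
  have hvals : pvGet c (pvFront wm)
      = (PySem.List.min? (PySem.List.slice c (some (i + 1)) (some (i + 7))) (fun x => x)).getD 0 := by
    rw [hfront, pvMin_slice c i h0 (by exact_mod_cast h7)]
  have hstep1 : (pvStepA (c, wm) i).1 = pvStepB c i := by
    simp only [pvStepA, pvStepB]
    rw [hvals]
  have hc1len : ((pvStepA (c, wm) i).1).length = c.length := by
    simp only [pvStepA]
    rw [pvSetD_eq c i _ h0]
    simp
  refine ⟨hstep1, ?_, hc1len⟩
  simp only [pvStepA]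
  set c1 := PySem.List.pySetD c i (pvGet c i + pvGet c (pvFront wm)) with hc1
  have hgc1 : ∀ j ∈ pvWin (i+1) 6, pvGet c1 j = pvGet c j := by
    intro j hj
    obtain ⟨hj1, hj2⟩ := pvWin_mem hj
    rw [hc1, pvGet_set c i j _ h0 (by omega), if_neg]
    rintro ⟨rfl, -⟩
    omega
  have hsnoc : pvWin (i+1) 6 = pvWin (i+1) 5 ++ [i+6] := by
    have := pvWin_snoc (i+1) 5
    simpa [(show i + 1 + (5:Int) = i + 6 from by ring), (show (5:Nat) + 1 = 6 from rfl)] using this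
  have hw5 : pvWin (i+1) 5 = (i+1) :: pvWin (i+2) 4 := by
    have := pvWin_cons (i+1) 4
    simpa [(show i+1+1 = i+2 from by ring)] using this
  have hwm1 : (if pvFront wm = i + 6 then wm.dropLast else wm) = pvMkdeq c (pvWin (i+1) 5) := by
    by_cases hex : ∃ j ∈ pvWin (i+1) 5, pvGet c j < pvGet c (i+6)
    · have heq : pvMkdeq c (pvWin (i+1) 6) = pvMkdeq c (pvWin (i+1) 5) := by
        rw [hsnoc]
        exact pvMkdeq_append_lt _ _ _ hex
      have hne : pvFront wm ≠ i + 6 := by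
        rw [hwm, heq]
        obtain ⟨g1, g2, g3⟩ := pvMkdeq_getLast c (pvWin (i+2) 4) (i+1)
        rw [pvFront, hw5, g1, Option.getD_some]
        intro hcon
        have hmem : pvScan c (i+1) (pvWin (i+2) 4) ∈ pvWin (i+1) 5 := hw5 ▸ g2
        have := pvWin_mem hmem
        omega
      rw [if_neg hne, hwm, heq]
    · push_neg at hex
      have heq : pvMkdeq c (pvWin (i+1) 6) = pvMkdeq c (pvWin (i+1) 5) ++ [i+6] := by
        rw [hsnoc]
        exact pvMkdeq_append_le _ _ _ hex
      have hfr : pvFront wm = i + 6 := by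
        rw [hwm, heq, pvFront, List.getLast?_concat, Option.getD_some]
      rw [if_pos hfr, hwm, heq, List.dropLast_concat]
  rw [hwm1]
  have hcongr : pvMkdeq c (pvWin (i+1) 5) = pvMkdeq c1 (pvWin (i+1) 5) := by
    apply pvMkdeq_congr
    intro j hj
    exact (hgc1 j (by rw [hsnoc]; exact List.mem_append_left _ hj)).symm
  rw [hcongr, pvPush_mkdeq, ← pvWin_cons]

lemma pvLoop1 (c : List Int) : ∀ (k : Nat) (lo : Int) (len : Nat),
    (PySem.List.pyRange (lo + k) lo (-1)).foldl (pvPush c) (pvMkdeq c (pvWin (lo + k + 1) len))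
      = pvMkdeq c (pvWin (lo + 1) (len + k)) := by
  intro k
  induction k with
  | zero =>
    intro lo len
    rw [PySem.List.pyRange_neg_one_eq_nil (by simp)]
    simp
  | succ k ih =>
    intro lo len
    rw [PySem.List.pyRange_neg_one_cons (by push_cast; omega)]
    simp only [List.foldl_cons]
    have hpush : pvPush c (pvMkdeq c (pvWin (lo + ((k:Nat)+1:ℕ) + 1) len)) (lo + ((k:Nat)+1:ℕ))
        = pvMkdeq c (pvWin (lo + ((k:Nat)+1:ℕ)) (len+1)) := by
      rw [pvPush_mkdeq, ← pvWin_cons]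
    rw [hpush]
    have e1 : lo + (((k:Nat)+1:ℕ):Int) - 1 = lo + (k:Int) := by push_cast; ring
    have e2 : lo + (((k:Nat)+1:ℕ):Int) = lo + (k:Int) + 1 := by push_cast; ring
    rw [e1, e2]
    have := ih lo (len+1)
    rw [show len + 1 + k = len + (k+1) from by omega] at this
    exact this

lemma pvLoop2 : ∀ (m : Nat) (c wm : List Int),
    (m : Int) + 7 ≤ (c.length : Int) →
    wm = pvMkdeq c (pvWin ((m : Int) + 1) 6) →
    ((PySem.List.pyRange (m : Int) (-1) (-1)).foldl pvStepA (c, wm)).1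
        = (PySem.List.pyRange (m : Int) (-1) (-1)).foldl pvStepB c
    ∧ ((PySem.List.pyRange (m : Int) (-1) (-1)).foldl pvStepA (c, wm)).2
        = pvMkdeq (((PySem.List.pyRange (m : Int) (-1) (-1)).foldl pvStepA (c, wm)).1) (pvWin 0 6) := by
  intro m
  induction m with
  | zero =>
    intro c wm hlen hwm
    rw [show ((0:Nat):Int) = (0:Int) from rfl] at *
    rw [PySem.List.pyRange_neg_one_cons (by omega)]
    rw [show (0:Int) - 1 = -1 from by ring, PySem.List.pyRange_neg_one_eq_nil (by omega)]
    simp only [List.foldl_cons, List.foldl_nil]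
    obtain ⟨s1, s2, s3⟩ := pvStepA_spec c wm 0 (by omega) (by omega) (by simpa using hwm)
    exact ⟨s1, by simpa using s2⟩
  | succ m ih =>
    intro c wm hlen hwm
    have hc : (((m+1:Nat)):Int) = (m:Int) + 1 := by push_cast; ring
    rw [hc] at *
    rw [PySem.List.pyRange_neg_one_cons (by omega)]
    rw [show ((m:Int) + 1) - 1 = (m:Int) from by ring]
    simp only [List.foldl_cons]
    obtain ⟨s1, s2, s3⟩ := pvStepA_spec c wm ((m:Int)+1) (by omega) (by omega)
      (by rw [hwm]; norm_num)
    set st := pvStepA (c, wm) ((m:Int)+1) with hst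
    have hih := ih st.1 st.2 (by rw [s3]; omega) (by simpa using s2)
    have heta : (st.1, st.2) = st := rfl
    rw [heta] at hih
    refine ⟨?_, hih.2⟩
    rw [hih.1, s1]

lemma pvFinal (c wm : List Int) (hwm : wm = pvMkdeq c (pvWin 0 6)) :
    pvFront wm + 1
      = (PySem.List.pyRange 0 6 1).foldl
          (fun best j => if pvGet c j ≤ pvGet c best then j else best) 0 + 1 := by
  obtain ⟨h1, h2, h3⟩ := pvMkdeq_getLast c (pvWin 1 5) 0
  have hw : pvWin 0 6 = 0 :: pvWin 1 5 := by simpa using pvWin_cons 0 5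
  have hr : PySem.List.pyRange 0 6 1 = 0 :: pvWin 1 5 := by decide
  congr 1
  rw [hwm, hw, pvFront, h1, Option.getD_some, hr]
  show pvScan c 0 (pvWin 1 5) = _
  simp only [List.foldl_cons]
  rw [show (if pvGet c 0 ≤ pvGet c 0 then (0:Int) else 0) = 0 from by simp]
  rfl

-- ===== VERDICT (by name: the statement is the Claim_ definition above) =====
theorem GetFirstDiceRollOfBestSequence1_spec : Claim_equal_GetFirstDiceRollOfBestSequence1 := by
  intro cells _
  unfold Spec_GetFirstDiceRollOfBestSequence1
  unfold GetFirstDiceRollOfBestSequence1 GetFirstDiceRollOfBestSequence1_alt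
  by_cases h6 : (cells.length : Int) < 6
  · simp [h6]
  · push_neg at h6
    simp only [if_neg (by omega : ¬ ((cells.length : Int) < 6))]
    set n : Int := (cells.length : Int) with hn
    have hL1 : (PySem.List.pyRange (n - 1) (n - 7) (-1)).foldl (pvPush cells) []
        = pvMkdeq cells (pvWin (n - 6) 6) := by
      have h := pvLoop1 cells 6 (n - 7) 0
      rw [show (n - 7) + ((6:Nat):Int) = n - 1 from by push_cast; ring,
          show (n - 7) + 1 = n - 6 from by ring] at h
      rw [show pvMkdeq cells (pvWin (n - 1 + 1) 0) = [] from by simp [pvWin, pvMkdeq]] at h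
      simpa using h
    set wm0 := (PySem.List.pyRange (n - 1) (n - 7) (-1)).foldl (pvPush cells) [] with hwm0
    rcases lt_or_ge cells.length 7 with h7 | h7
    · have hnil : PySem.List.pyRange (n - 7) (-1) (-1) = [] :=
        PySem.List.pyRange_neg_one_eq_nil (by omega)
      rw [hnil]
      simp only [List.foldl_nil]
      exact pvFinal cells wm0 (by rw [hL1, show n - 6 = (0:Int) from by omega])
    · have hm : n - 7 = ((cells.length - 7 : Nat) : Int) := by omega
      have hL2 := pvLoop2 (cells.length - 7) cells wm0 (by omega)
        (by rw [hL1, show ((cells.length - 7 : Nat) : Int) + 1 = n - 6 from by omega])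
      rw [← hm] at hL2
      obtain ⟨e1, e2⟩ := hL2
      rw [← e1]
      exact pvFinal _ _ e2
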